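-- pv_equiv track=rewrite | github.com/SoerenToennesen/algorithms-practice | CodilityTests/Lesson6_Sorting/1Easy_Triangle.py | solution
-- ===== SOURCE A (Python) =====
-- def solution(A):
--     A.sort()
--     for i in range(len(A) - 1):
--         up_to = A[i] + A[i+1]
--         for j in range(i+1, len(A)):
--             up_to = A[i] + A[j]
--             for k in range(j+1, len(A)):
--                 if A[k] >= up_to:
--                     break
--                 if A[k] + A[i] > A[j] and A[j] + A[k] > A[i]:
--                     return 1
--     return 0
-- ===== SOURCE B (Python) =====
-- def solution(A):
--     S = sorted(A)
--     for i in range(len(S) - 2):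
--         if S[i] + S[i+1] > S[i+2]:
--             return 1
--     return 0
-- ===== Notes on version B (the rewrite author's own statement) =====
-- stated objective: faster
-- what changed: Replaced the three nested index loops over all triples by a single pass over consecutive triples of the sorted array (a triangle exists iff some consecutive sorted triple satisfies the inequality), and B does not mutate its argument (A sorts it in place).
import Mathlib
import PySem

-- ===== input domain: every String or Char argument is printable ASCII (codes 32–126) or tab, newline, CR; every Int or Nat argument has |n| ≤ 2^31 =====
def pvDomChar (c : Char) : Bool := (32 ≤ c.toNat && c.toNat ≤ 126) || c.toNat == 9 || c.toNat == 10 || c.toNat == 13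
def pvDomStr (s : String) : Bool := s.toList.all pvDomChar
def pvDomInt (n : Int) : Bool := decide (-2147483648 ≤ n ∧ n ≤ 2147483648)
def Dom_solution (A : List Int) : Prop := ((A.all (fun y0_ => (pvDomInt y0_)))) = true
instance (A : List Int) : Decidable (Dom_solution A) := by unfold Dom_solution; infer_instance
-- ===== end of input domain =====

-- B replaces A's O(n^3) triple-nested scan by one pass over consecutive triples of the
-- sorted array (faster, asymptotic). A sorts its argument in place; the equivalence
-- proved here is about the RETURN value only (B does not mutate its argument).

-- ===== PORT A =====
-- inner `for k in range(j+1, len(A))`: break when A[k] >= up_to, return 1 on the triangle test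
def pvKLoop (S : List Int) (i j : Nat) (ks : List Nat) : Bool :=
  match ks with
  | [] => false
  | k :: rest =>
    -- up_to = A[i] + A[j]; all of i, j, k come from ranges inside [0, len), so
    -- Python's A[·] is exactly getD · 0 here
    if S.getD i 0 + S.getD j 0 ≤ S.getD k 0 then false          -- `if A[k] >= up_to: break`
    else if S.getD j 0 < S.getD k 0 + S.getD i 0 ∧ S.getD i 0 < S.getD j 0 + S.getD k 0
      then true                                                  -- `return 1`
      else pvKLoop S i j rest

-- middle `for j in range(i+1, len(A))` (the `up_to` assigned before the k loop is re-assigned there)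
def pvJLoop (S : List Int) (i : Nat) (js : List Nat) : Bool :=
  match js with
  | [] => false
  | j :: rest =>
    if pvKLoop S i j (List.range' (j+1) (S.length - (j+1))) then true
    else pvJLoop S i rest

-- outer `for i in range(len(A) - 1)` (its first `up_to = A[i] + A[i+1]` is dead: overwritten in the j loop)
def pvILoop (S : List Int) (is_ : List Nat) : Bool :=
  match is_ with
  | [] => false
  | i :: rest =>
    if pvJLoop S i (List.range' (i+1) (S.length - (i+1))) then true
    else pvILoop S rest

def solution (A : List Int) : Int :=
  let S := PySem.List.sorted A (fun x => x) false   -- A.sort()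
  if pvILoop S (List.range (S.length - 1)) then 1 else 0

-- ===== PORT B =====
-- `for i in range(len(S) - 2): if S[i] + S[i+1] > S[i+2]: return 1`
def pvConsec (S : List Int) (ts : List Nat) : Bool :=
  match ts with
  | [] => false
  | t :: rest =>
    if S.getD (t+2) 0 < S.getD t 0 + S.getD (t+1) 0 then true
    else pvConsec S rest

def solution_alt (A : List Int) : Int :=
  let S := PySem.List.sorted A (fun x => x) false   -- S = sorted(A)
  if pvConsec S (List.range (S.length - 2)) then 1 else 0

-- ===== PRECONDITION & SPEC =====
def Spec_solution (A : List Int) (out : Int) : Prop := out = solution_alt A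
instance (A : List Int) (out : Int) : Decidable (Spec_solution A out) := by unfold Spec_solution; infer_instance

-- ===== CLAIM (what is proved, stated in full; the proofs are below) =====
def Claim_equal_solution : Prop := ∀ (A : List Int), Dom_solution A → Spec_solution A (solution A)

-- ===== LEMMAS AND PROOFS =====

-- getD is monotone on a sorted list (within range)
theorem pv_getD_mono (xs : List Int) (a b : Nat) (hab : a ≤ b)
    (hb : b < (PySem.List.sorted xs (fun x => x) false).length) :
    (PySem.List.sorted xs (fun x => x) false).getD a 0 ≤
      (PySem.List.sorted xs (fun x => x) false).getD b 0 := by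
  rw [List.getD_eq_getElem _ 0 (by omega), List.getD_eq_getElem _ 0 hb]
  exact PySem.List.sorted_id_getElem_mono xs hab hb

theorem pvConsec_iff (S : List Int) (ts : List Nat) :
    pvConsec S ts = true ↔ ∃ t ∈ ts, S.getD (t+2) 0 < S.getD t 0 + S.getD (t+1) 0 := by
  induction ts with
  | nil => simp [pvConsec]
  | cons t rest ih =>
    by_cases h : S.getD (t+2) 0 < S.getD t 0 + S.getD (t+1) 0
    · have ht : pvConsec S (t :: rest) = true := by simp only [pvConsec, if_pos h]
      exact iff_of_true ht ⟨t, by simp, h⟩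
    · have ht : pvConsec S (t :: rest) = pvConsec S rest := by
        simp only [pvConsec, if_neg h]
      rw [ht, ih]
      constructor
      · rintro ⟨t', ht', h'⟩; exact ⟨t', by simp [ht'], h'⟩
      · rintro ⟨t', ht', h'⟩
        rcases List.mem_cons.mp ht' with rfl | ht'
        · exact absurd h' h
        · exact ⟨t', ht', h'⟩

theorem pvKLoop_iff (S : List Int) (i j : Nat) (ks : List Nat)
    (hmono : ∀ a ∈ ks, ∀ b ∈ ks, a ≤ b → S.getD a 0 ≤ S.getD b 0)
    (hpw : ks.Pairwise (· ≤ ·)) :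
    pvKLoop S i j ks = true ↔
      ∃ k ∈ ks, S.getD k 0 < S.getD i 0 + S.getD j 0 ∧
        S.getD j 0 < S.getD k 0 + S.getD i 0 ∧ S.getD i 0 < S.getD j 0 + S.getD k 0 := by
  induction ks with
  | nil => simp [pvKLoop]
  | cons k rest ih =>
    rcases List.pairwise_cons.mp hpw with ⟨hk_le, hpw'⟩
    by_cases hbrk : S.getD i 0 + S.getD j 0 ≤ S.getD k 0
    · simp only [pvKLoop, if_pos hbrk]
      constructor
      · intro h; exact absurd h (by simp)
      · rintro ⟨k', hk', hlt, -, -⟩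
        rcases List.mem_cons.mp hk' with rfl | h
        · omega
        · have : S.getD k 0 ≤ S.getD k' 0 :=
            hmono k (by simp) k' (by simp [h]) (hk_le _ h)
          omega
    · by_cases htri : S.getD j 0 < S.getD k 0 + S.getD i 0 ∧ S.getD i 0 < S.getD j 0 + S.getD k 0
      · simp only [pvKLoop, if_neg hbrk, if_pos htri, true_iff]
        exact ⟨k, by simp, by omega, htri⟩
      · have ih' := ih (fun a ha b hb hab =>
          hmono a (by simp [ha]) b (by simp [hb]) hab) hpw'
        simp only [pvKLoop, if_neg hbrk, if_neg htri, ih']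
        constructor
        · rintro ⟨k', hk', h⟩; exact ⟨k', by simp [hk'], h⟩
        · rintro ⟨k', hk', h⟩
          rcases List.mem_cons.mp hk' with rfl | hk'
          · exact absurd ⟨h.2.1, h.2.2⟩ htri
          · exact ⟨k', hk', h⟩

theorem pvJLoop_iff (S : List Int) (i : Nat) (js : List Nat)
    (hS : ∀ a b : Nat, a ≤ b → b < S.length → S.getD a 0 ≤ S.getD b 0) :
    pvJLoop S i js = true ↔
      ∃ j ∈ js, ∃ k ∈ List.range' (j+1) (S.length - (j+1)),
        S.getD k 0 < S.getD i 0 + S.getD j 0 ∧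
        S.getD j 0 < S.getD k 0 + S.getD i 0 ∧ S.getD i 0 < S.getD j 0 + S.getD k 0 := by
  induction js with
  | nil => simp [pvJLoop]
  | cons j rest ih =>
    have hk := pvKLoop_iff S i j (List.range' (j+1) (S.length - (j+1)))
      (fun a ha b hb hab => by
        rcases List.mem_range'_1.mp hb with ⟨hb1, hb2⟩
        exact hS a b hab (by omega))
      ((List.pairwise_lt_range' 1 Nat.one_pos).imp (fun h => Nat.le_of_lt h))
    by_cases h : pvKLoop S i j (List.range' (j+1) (S.length - (j+1))) = true
    · simp only [pvJLoop, if_pos h, true_iff]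
      exact ⟨j, by simp, hk.mp h⟩
    · simp only [pvJLoop, if_neg h, ih]
      constructor
      · rintro ⟨j', hj', hrest⟩; exact ⟨j', by simp [hj'], hrest⟩
      · rintro ⟨j', hj', hrest⟩
        rcases List.mem_cons.mp hj' with rfl | hj'
        · exact absurd (hk.mpr hrest) h
        · exact ⟨j', hj', hrest⟩

theorem pvILoop_iff (S : List Int) (is_ : List Nat)
    (hS : ∀ a b : Nat, a ≤ b → b < S.length → S.getD a 0 ≤ S.getD b 0) :
    pvILoop S is_ = true ↔
      ∃ i ∈ is_, ∃ j ∈ List.range' (i+1) (S.length - (i+1)),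
        ∃ k ∈ List.range' (j+1) (S.length - (j+1)),
        S.getD k 0 < S.getD i 0 + S.getD j 0 ∧
        S.getD j 0 < S.getD k 0 + S.getD i 0 ∧ S.getD i 0 < S.getD j 0 + S.getD k 0 := by
  induction is_ with
  | nil => simp [pvILoop]
  | cons i rest ih =>
    have hj := pvJLoop_iff S i (List.range' (i+1) (S.length - (i+1))) hS
    by_cases h : pvJLoop S i (List.range' (i+1) (S.length - (i+1))) = true
    · simp only [pvILoop, if_pos h, true_iff]
      exact ⟨i, by simp, hj.mp h⟩
    · simp only [pvILoop, if_neg h, ih]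
      constructor
      · rintro ⟨i', hi', hrest⟩; exact ⟨i', by simp [hi'], hrest⟩
      · rintro ⟨i', hi', hrest⟩
        rcases List.mem_cons.mp hi' with rfl | hi'
        · exact absurd (hj.mpr hrest) h
        · exact ⟨i', hi', hrest⟩

-- key step: on a list with monotone getD, some triple i<j<k<len has S[i]+S[j] > S[k]
-- iff some CONSECUTIVE triple does
theorem pv_exists_triple_iff_consec (S : List Int)
    (hS : ∀ a b : Nat, a ≤ b → b < S.length → S.getD a 0 ≤ S.getD b 0) :
    (∃ i j k : Nat, i < j ∧ j < k ∧ k < S.length ∧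
        S.getD k 0 < S.getD i 0 + S.getD j 0) ↔
      (∃ t : Nat, t + 2 < S.length ∧ S.getD (t+2) 0 < S.getD t 0 + S.getD (t+1) 0) := by
  constructor
  · rintro ⟨i, j, k, hij, hjk, hk, hlt⟩
    refine ⟨k - 2, by omega, ?_⟩
    have h1 : S.getD i 0 ≤ S.getD (k-2) 0 := hS i (k-2) (by omega) (by omega)
    have h2 : S.getD j 0 ≤ S.getD (k-2+1) 0 := hS j (k-2+1) (by omega) (by omega)
    have hkk : k - 2 + 2 = k := by omega
    rw [hkk]; omega
  · rintro ⟨t, ht, hlt⟩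
    exact ⟨t, t+1, t+2, by omega, by omega, ht, hlt⟩

theorem pv_main (S : List Int)
    (hS : ∀ a b : Nat, a ≤ b → b < S.length → S.getD a 0 ≤ S.getD b 0) :
    (if pvILoop S (List.range (S.length - 1)) then (1 : Int) else 0) =
      (if pvConsec S (List.range (S.length - 2)) then (1 : Int) else 0) := by
  have hA := pvILoop_iff S (List.range (S.length - 1)) hS
  have hB := pvConsec_iff S (List.range (S.length - 2))
  have hiff : pvILoop S (List.range (S.length - 1)) = true ↔
      pvConsec S (List.range (S.length - 2)) = true := by
    rw [hA, hB]
    constructor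
    · rintro ⟨i, hi, j, hj, k, hk, hlt, -, -⟩
      rcases List.mem_range'_1.mp hj with ⟨hj1, hj2⟩
      rcases List.mem_range'_1.mp hk with ⟨hk1, hk2⟩
      rcases (pv_exists_triple_iff_consec S hS).mp
        ⟨i, j, k, by omega, by omega, by omega, hlt⟩ with ⟨t, ht, htlt⟩
      exact ⟨t, List.mem_range.mpr (by omega), htlt⟩
    · rintro ⟨t, htm, htlt⟩
      have ht := List.mem_range.mp htm
      rcases (pv_exists_triple_iff_consec S hS).mpr ⟨t, by omega, htlt⟩ with
        ⟨i, j, k, hij, hjk, hk, hlt⟩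
      have h1 : S.getD i 0 ≤ S.getD j 0 := hS i j (by omega) (by omega)
      have h2 : S.getD j 0 ≤ S.getD k 0 := hS j k (by omega) hk
      exact ⟨i, List.mem_range.mpr (by omega), j,
        List.mem_range'_1.mpr ⟨by omega, by omega⟩, k,
        List.mem_range'_1.mpr ⟨by omega, by omega⟩, hlt, by omega, by omega⟩
  by_cases hc : pvConsec S (List.range (S.length - 2)) = true
  · rw [if_pos (hiff.mpr hc), if_pos hc]
  · rw [if_neg (fun h => hc (hiff.mp h)), if_neg hc]

-- ===== VERDICT (by name: the statement is the Claim_ definition above) =====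
theorem solution_spec : Claim_equal_solution := by
  intro A _
  unfold Spec_solution solution solution_alt
  exact pv_main (PySem.List.sorted A (fun x => x) false)
    (fun a b hab hb => pv_getD_mono A a b hab hb)
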